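-- pv_equiv track=rewrite | github.com/sunyuzheng/kedaibiao-content-tools | tools/check/find_duplicates.py | find_duplicates_by_duration
-- ===== SOURCE A (Python) =====
-- from typing import List, Dict, Set, Tuple
-- from collections import defaultdict
--
-- def find_duplicates_by_duration(episodes: List[Dict], tolerance: int = 5) -> Dict[int, List[Dict]]:
--     """通过时长查找重复（允许一定误差）"""
--     duration_groups = defaultdict(list)
--
--     for ep in episodes:
--         duration = ep.get("duration")
--         if duration:
--             # 将时长四舍五入到最近的tolerance秒
--             rounded = (duration // tolerance) * tolerance
--             duration_groups[rounded].append(ep)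
--
--     # 只返回有重复的组
--     duplicates = {k: v for k, v in duration_groups.items() if len(v) > 1}
--     return duplicates
-- ===== SOURCE B (Python) =====
-- from typing import List, Dict
--
--
-- def find_duplicates_by_duration(episodes: List[Dict], tolerance: int = 5) -> Dict[int, List[Dict]]:
--     """Distinct-key gather: compute keys once, then collect each first-seen key's group by a scan."""
--     keyed = [((ep.get("duration") // tolerance) * tolerance, ep)
--              for ep in episodes if ep.get("duration")]
--     result = {}
--     seen = []
--     for k, _ in keyed:
--         if k not in seen:
--             seen.append(k)
--             group = [ep for kk, ep in keyed if kk == k]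
--             if len(group) > 1:
--                 result[k] = group
--     return result
-- ===== Notes on version B (the rewrite author's own statement) =====
-- stated objective: alternative
-- what changed: Replaces incremental defaultdict bucketing followed by a dict-comprehension filter with a precomputed (key, episode) list walked once: each first-seen key's whole group is gathered by a scan of that list and emitted only if it has more than one member.
import Mathlib
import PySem

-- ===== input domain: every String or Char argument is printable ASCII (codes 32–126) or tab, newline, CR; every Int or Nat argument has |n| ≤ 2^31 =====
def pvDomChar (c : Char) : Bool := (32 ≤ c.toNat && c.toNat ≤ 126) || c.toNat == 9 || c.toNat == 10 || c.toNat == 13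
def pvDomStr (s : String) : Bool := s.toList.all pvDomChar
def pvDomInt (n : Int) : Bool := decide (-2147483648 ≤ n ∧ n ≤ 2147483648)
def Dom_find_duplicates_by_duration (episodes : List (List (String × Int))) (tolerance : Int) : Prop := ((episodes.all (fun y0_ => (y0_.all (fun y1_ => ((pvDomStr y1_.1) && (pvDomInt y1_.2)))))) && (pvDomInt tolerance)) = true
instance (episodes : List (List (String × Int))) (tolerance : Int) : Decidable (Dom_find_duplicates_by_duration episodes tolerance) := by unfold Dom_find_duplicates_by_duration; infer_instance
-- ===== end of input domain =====

-- B replaces A's incremental hash-bucketing with a precomputed keyed list scanned per first-seen key (alternative decomposition, same results).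

-- ===== PORT A =====
def find_duplicates_by_duration (episodes : List (List (String × Int))) (tolerance : Int) : List (Int × List (List (String × Int))) :=
  let duration_groups : PySem.Dict Int (List (List (String × Int))) :=
    episodes.foldl (fun d ep =>
      match List.lookup "duration" ep with
      | some duration =>
          -- 'if duration:' — present and non-zero
          if duration ≠ 0 then
            d.modify (PySem.Int.floordiv duration tolerance * tolerance) [] (fun g => g ++ [ep])
          else d
      | none => d)
      PySem.Dict.empty
  duration_groups.items.filter (fun kv => kv.2.length > 1)

-- ===== PORT B =====
def find_duplicates_by_duration_alt (episodes : List (List (String × Int))) (tolerance : Int) : List (Int × List (List (String × Int))) :=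
  let keyed : List (Int × List (String × Int)) :=
    episodes.filterMap (fun ep =>
      match List.lookup "duration" ep with
      | some duration =>
          if duration ≠ 0 then some (PySem.Int.floordiv duration tolerance * tolerance, ep) else none
      | none => none)
  (keyed.foldl (fun sr ke =>
      if ke.1 ∈ sr.1 then sr
      else
        let group := (keyed.filter (fun p => p.1 == ke.1)).map Prod.snd
        (sr.1 ++ [ke.1], if group.length > 1 then sr.2 ++ [(ke.1, group)] else sr.2))
    ([], [])).2

-- ===== PRECONDITION & SPEC =====
-- Pre_ excludes exactly the inputs where Python A raises ZeroDivisionError: tolerance = 0 together with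
-- at least one episode whose "duration" is present and non-zero (truthy).
def Pre_find_duplicates_by_duration (episodes : List (List (String × Int))) (tolerance : Int) : Prop :=
  tolerance ≠ 0 ∨ episodes.all (fun ep => (List.lookup "duration" ep).getD 0 == 0) = true
instance (episodes : List (List (String × Int))) (tolerance : Int) : Decidable (Pre_find_duplicates_by_duration episodes tolerance) := by unfold Pre_find_duplicates_by_duration; infer_instance

def pvWitness_find_duplicates_by_duration : (List (List (String × Int))) × Int :=
  ([[("duration", 10), ("title", 1)], [("duration", 12)], [("duration", 0)], []], 5)

def Spec_find_duplicates_by_duration (episodes : List (List (String × Int))) (tolerance : Int) (out : List (Int × List (List (String × Int)))) : Prop := out = find_duplicates_by_duration_alt episodes tolerance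
instance (episodes : List (List (String × Int))) (tolerance : Int) (out : List (Int × List (List (String × Int)))) : Decidable (Spec_find_duplicates_by_duration episodes tolerance out) := by unfold Spec_find_duplicates_by_duration; infer_instance

-- ===== CLAIM (what is proved, stated in full; the proofs are below) =====
def Claim_equal_find_duplicates_by_duration : Prop := ∀ (episodes : List (List (String × Int))) (tolerance : Int), Dom_find_duplicates_by_duration episodes tolerance → Pre_find_duplicates_by_duration episodes tolerance → Spec_find_duplicates_by_duration episodes tolerance (find_duplicates_by_duration episodes tolerance)

-- ===== LEMMAS AND PROOFS =====

-- the shared keyed list (proof-side name for the 'let keyed' in port B)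
def pvL (episodes : List (List (String × Int))) (tolerance : Int) : List (Int × List (String × Int)) :=
  episodes.filterMap (fun ep =>
    match List.lookup "duration" ep with
    | some duration =>
        if duration ≠ 0 then some (PySem.Int.floordiv duration tolerance * tolerance, ep) else none
    | none => none)

-- keys of M that are new relative to seen-list s, in first-occurrence order
def pvNewKeys (s : List Int) (M : List (Int × List (String × Int))) : List Int :=
  match M with
  | [] => []
  | (k, _) :: M => if k ∈ s then pvNewKeys s M else k :: pvNewKeys (s ++ [k]) M

-- A's fold over episodes is the grouping fold over the keyed list
lemma foldA_eq (episodes : List (List (String × Int))) (tolerance : Int)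
    (d : PySem.Dict Int (List (List (String × Int)))) :
    episodes.foldl (fun d ep =>
      match List.lookup "duration" ep with
      | some duration =>
          if duration ≠ 0 then
            d.modify (PySem.Int.floordiv duration tolerance * tolerance) [] (fun g => g ++ [ep])
          else d
      | none => d) d
    = (pvL episodes tolerance).foldl (fun d p => d.modify p.1 [] (fun g => g ++ [p.2])) d := by
  induction episodes generalizing d with
  | nil => rfl
  | cons ep eps ih =>
    rw [List.foldl_cons]
    cases h : List.lookup "duration" ep with
    | none =>
      rw [show pvL (ep :: eps) tolerance = pvL eps tolerance by
            simp [pvL, h]]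
      exact ih d
    | some duration =>
      by_cases hz : duration = 0
      · rw [show pvL (ep :: eps) tolerance = pvL eps tolerance by
              simp [pvL, h, hz]]
        simpa [h, hz] using ih d
      · rw [show pvL (ep :: eps) tolerance
              = (PySem.Int.floordiv duration tolerance * tolerance, ep) :: pvL eps tolerance by
              simp [pvL, h, hz]]
        rw [List.foldl_cons]
        simp only []
        rw [if_pos hz]
        exact ih (d.modify (PySem.Int.floordiv duration tolerance * tolerance) []
          (fun g => g ++ [ep]))

-- Set.update relative to a seen list is append of the new keys
lemma update_eq_newKeys (M : List (Int × List (String × Int))) (s : List Int) :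
    PySem.Set.update s (M.map Prod.fst) = s ++ pvNewKeys s M := by
  induction M generalizing s with
  | nil => simp [pvNewKeys, PySem.Set.update_nil]
  | cons ke M ih =>
    obtain ⟨k, e⟩ := ke
    by_cases hk : k ∈ s
    · simp [pvNewKeys, hk, PySem.Set.update_cons, ih]
    · simp [pvNewKeys, hk, PySem.Set.update_cons, ih]

-- B's fold, from any state, appends exactly the big-group entries of the new keys
lemma foldB_eq (L M : List (Int × List (String × Int))) (s : List Int)
    (r : List (Int × List (List (String × Int)))) :
    M.foldl (fun sr ke =>
      if ke.1 ∈ sr.1 then sr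
      else
        let group := (L.filter (fun p => p.1 == ke.1)).map Prod.snd
        (sr.1 ++ [ke.1], if group.length > 1 then sr.2 ++ [(ke.1, group)] else sr.2))
      (s, r)
    = (s ++ pvNewKeys s M,
       r ++ ((pvNewKeys s M).map
              (fun k => (k, (L.filter (fun p => p.1 == k)).map Prod.snd))).filter
            (fun kv => kv.2.length > 1)) := by
  induction M generalizing s r with
  | nil => simp [pvNewKeys]
  | cons ke M ih =>
    obtain ⟨k, e⟩ := ke
    by_cases hk : k ∈ s
    · simpa [pvNewKeys, hk] using ih s r
    · simp only [List.foldl_cons, pvNewKeys, hk, if_false]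
      rw [ih]
      by_cases hg : 1 < (List.filter (fun p => p.1 == k) L).length <;>
        simp [hg]

-- the grouping fold's items, filtered, give the map-over-new-keys form
lemma itemsA_eq (L : List (Int × List (String × Int))) :
    ((L.foldl (fun d p => d.modify p.1 [] (fun g => g ++ [p.2]))
        (PySem.Dict.empty : PySem.Dict Int (List (List (String × Int))))).items)
    = (pvNewKeys [] L).map (fun k => (k, (L.filter (fun p => p.1 == k)).map Prod.snd)) := by
  have hnd : (L.foldl (fun d p => d.modify p.1 [] (fun g => g ++ [p.2]))
      (PySem.Dict.empty : PySem.Dict Int (List (List (String × Int))))).keys.Nodup := by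
    exact PySem.Dict.nodup_keys_foldl_modify_key L Prod.fst []
      (fun _ p => fun g => g ++ [p.2]) PySem.Dict.empty (by simp)
  have hkeys : (L.foldl (fun d p => d.modify p.1 [] (fun g => g ++ [p.2]))
      (PySem.Dict.empty : PySem.Dict Int (List (List (String × Int))))).keys
      = pvNewKeys [] L := by
    rw [PySem.Dict.keys_foldl_modify_key]
    have := update_eq_newKeys L []
    simpa using this
  rw [PySem.Dict.items_eq_map_keys _ hnd [], hkeys]
  apply List.map_congr_left
  intro k _
  rw [PySem.Dict.getD_foldl_modify_append]
  simp

-- ===== VERDICT (by name: the statement is the Claim_ definition above) =====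
theorem find_duplicates_by_duration_spec : Claim_equal_find_duplicates_by_duration := by
  intro episodes tolerance _ _
  unfold Spec_find_duplicates_by_duration find_duplicates_by_duration find_duplicates_by_duration_alt
  dsimp only
  rw [foldA_eq, itemsA_eq, show (episodes.filterMap (fun ep =>
      match List.lookup "duration" ep with
      | some duration =>
          if duration ≠ 0 then some (PySem.Int.floordiv duration tolerance * tolerance, ep) else none
      | none => none)) = pvL episodes tolerance from rfl, foldB_eq]
  simp
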